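-- pv_equiv track=rewrite | github.com/cristian-menesesz/leetcode-solutions | python/medium/longest-balanced-substring-ii.py | _longest_three_balanced
-- ===== SOURCE A (Python) =====
-- def _longest_three_balanced(s: str) -> int:
--     """
--     Longest substring where count(a) == count(b) == count(c).
--     """
--     # Track differences relative to 'a'
--     first_occurrence = {(0, 0): -1}
--
--     count_a = count_b = count_c = 0
--     max_length = 0
--
--     for i, ch in enumerate(s):
--         if ch == 'a':
--             count_a += 1
--         elif ch == 'b':
--             count_b += 1
--         else:
--             count_c += 1
--
--         # State defined by two independent differences
--         state = (count_b - count_a, count_c - count_a)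
--
--         if state in first_occurrence:
--             max_length = max(max_length, i - first_occurrence[state])
--         else:
--             first_occurrence[state] = i
--
--     return max_length
-- ===== SOURCE B (Python) =====
-- def _longest_three_balanced(s: str) -> int:
--     n = len(s)
--     max_length = 0
--     for i in range(n):
--         count_a = count_b = count_c = 0
--         for j in range(i, n):
--             ch = s[j]
--             if ch == 'a':
--                 count_a += 1
--             elif ch == 'b':
--                 count_b += 1
--             else:
--                 count_c += 1
--             if count_a == count_b == count_c:
--                 max_length = max(max_length, j - i + 1)
--     return max_length
-- ===== Notes on version B (the rewrite author's own statement) =====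
-- stated objective: simpler
-- what changed: Replaced the single-pass prefix-difference hashmap (first-occurrence dict keyed by (count_b-count_a, count_c-count_a)) with a plain brute-force double loop that re-counts a/b/c from each start index and records balanced windows directly.
import Mathlib
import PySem

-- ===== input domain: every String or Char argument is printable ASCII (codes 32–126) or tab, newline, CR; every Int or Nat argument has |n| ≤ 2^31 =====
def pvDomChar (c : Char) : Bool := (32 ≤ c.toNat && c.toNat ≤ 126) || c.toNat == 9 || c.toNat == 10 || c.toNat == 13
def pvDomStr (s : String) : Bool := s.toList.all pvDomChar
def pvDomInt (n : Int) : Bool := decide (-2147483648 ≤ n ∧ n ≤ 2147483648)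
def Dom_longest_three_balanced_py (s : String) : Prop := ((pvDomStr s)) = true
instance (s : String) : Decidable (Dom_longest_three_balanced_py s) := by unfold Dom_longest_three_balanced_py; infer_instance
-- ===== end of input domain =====

-- B replaces A's single-pass first-occurrence hashmap over prefix differences with a plain
-- brute-force double loop (simpler to read; same return value; B is O(n^2) vs A's O(n)).

-- ===== PORT A =====
-- one loop step of A; `first_occurrence[state]` is read with getD, exact because it is
-- guarded by `contains state` (no KeyError path is reachable)
def pvAStep (st : PySem.Dict (Int × Int) Int × Int × Int × Int × Int) (p : Int × Char) :
    PySem.Dict (Int × Int) Int × Int × Int × Int × Int :=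
  let fo := st.1
  let ca := st.2.1
  let cb := st.2.2.1
  let cc := st.2.2.2.1
  let ml := st.2.2.2.2
  let cnts : Int × Int × Int :=
    if p.2 = 'a' then (ca + 1, cb, cc)
    else if p.2 = 'b' then (ca, cb + 1, cc)
    else (ca, cb, cc + 1)
  let state := (cnts.2.1 - cnts.1, cnts.2.2 - cnts.1)
  if fo.contains state then
    (fo, cnts.1, cnts.2.1, cnts.2.2, max ml (p.1 - fo.getD state 0))
  else
    (fo.insert state p.1, cnts.1, cnts.2.1, cnts.2.2, ml)

def longest_three_balanced_py (s : String) : Int :=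
  ((PySem.List.enumerate s.toList 0).foldl pvAStep
    (PySem.Dict.empty.insert ((0 : Int), (0 : Int)) (-1 : Int), 0, 0, 0, 0)).2.2.2.2

-- ===== PORT B =====
-- s[j] is read with pyGetD; exact because i ≤ j < len(s) throughout
def longest_three_balanced_py_alt (s : String) : Int :=
  let cs := s.toList
  let n : Int := cs.length
  (PySem.List.pyRange 0 n 1).foldl (fun ml i =>
    ((PySem.List.pyRange i n 1).foldl (fun st j =>
        let ch := PySem.List.pyGetD cs j ' '
        let cnts : Int × Int × Int :=
          if ch = 'a' then (st.1 + 1, st.2.1, st.2.2.1)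
          else if ch = 'b' then (st.1, st.2.1 + 1, st.2.2.1)
          else (st.1, st.2.1, st.2.2.1 + 1)
        (cnts.1, cnts.2.1, cnts.2.2,
          if cnts.1 = cnts.2.1 ∧ cnts.1 = cnts.2.2 then max st.2.2.2 (j - i + 1)
          else st.2.2.2))
      ((0 : Int), (0 : Int), (0 : Int), ml)).2.2.2) 0

-- ===== PRECONDITION & SPEC =====
def Spec_longest_three_balanced_py (s : String) (out : Int) : Prop := out = longest_three_balanced_py_alt s
instance (s : String) (out : Int) : Decidable (Spec_longest_three_balanced_py s out) := by unfold Spec_longest_three_balanced_py; infer_instance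

-- ===== CLAIM (what is proved, stated in full; the proofs are below) =====
def Claim_equal_longest_three_balanced_py : Prop := ∀ (s : String), Dom_longest_three_balanced_py s → Spec_longest_three_balanced_py s (longest_three_balanced_py s)

-- ===== LEMMAS AND PROOFS =====

-- prefix-difference vector of one char: (Δ(count_b - count_a), Δ(count_c - count_a))
def pvD (c : Char) : Int × Int := if c = 'a' then (-1, -1) else if c = 'b' then (1, 0) else (0, 1)
def pvPref (v : List Char) : Int × Int := (v.map pvD).sum
def pvP (cs : List Char) (j : ℕ) : Int × Int := pvPref (cs.take j)

theorem pvFFex (cs : List Char) (j : ℕ) : ∃ t, pvP cs t = pvP cs j := ⟨j, rfl⟩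
-- first index whose prefix state equals that of prefix j
def pvFF (cs : List Char) (j : ℕ) : ℕ := Nat.find (pvFFex cs j)

def pvTerm (cs : List Char) (i t : ℕ) : Int := if pvP cs (i + t + 1) = pvP cs i then (t : Int) + 1 else 0
def pvG (cs : List Char) (i : ℕ) : Int := ((List.range (cs.length - i)).map (pvTerm cs i)).foldl max 0
def pvBval (cs : List Char) : Int := ((List.range cs.length).map (pvG cs)).foldl max 0
def pvM (cs : List Char) : Int := ((List.range (cs.length + 1)).map (fun j : Nat => (j : Int) - (pvFF cs j : Int))).foldl max 0

-- ---- generic foldl-max lemmas ----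
theorem pv_le_foldl_max_init (l : List Int) (a : Int) : a ≤ l.foldl max a := by
  induction l generalizing a with
  | nil => simp
  | cons x t ih => exact le_trans (le_max_left a x) (ih _)

theorem pv_le_foldl_max_of_mem (l : List Int) (a x : Int) (hx : x ∈ l) : x ≤ l.foldl max a := by
  induction l generalizing a with
  | nil => simp at hx
  | cons y t ih =>
    rcases List.mem_cons.1 hx with h | h
    · subst h; exact le_trans (le_max_right a x) (pv_le_foldl_max_init _ _)
    · exact ih _ h

theorem pv_foldl_max_le (l : List Int) (a b : Int) (ha : a ≤ b) (h : ∀ x ∈ l, x ≤ b) :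
    l.foldl max a ≤ b := by
  induction l generalizing a with
  | nil => simpa using ha
  | cons x t ih =>
    exact ih _ (max_le ha (h x (List.mem_cons_self))) (fun y hy => h y (List.mem_cons_of_mem _ hy))

theorem pv_foldl_max_absorb (l : List Int) (a b : Int) (h : b ≤ a) :
    l.foldl max a = max a (l.foldl max b) := by
  induction l generalizing a b with
  | nil => simp [max_eq_left h]
  | cons x t ih =>
    simp only [List.foldl_cons]
    rw [ih (max a x) (max b x) (max_le_max_right x h)]
    have hx : x ≤ (t.foldl max (max b x)) := le_trans (le_max_right b x) (pv_le_foldl_max_init _ _)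
    rw [max_assoc, max_eq_right hx]

theorem pvM_nonneg (cs : List Char) : 0 ≤ pvM cs := pv_le_foldl_max_init _ _
theorem pvBval_nonneg (cs : List Char) : 0 ≤ pvBval cs := pv_le_foldl_max_init _ _

-- ---- prefix lemmas ----
theorem pvPref_append (u : List Char) (c : Char) : pvPref (u ++ [c]) = pvPref u + pvD c := by
  simp [pvPref]

theorem pvP_append_le (cs : List Char) (c : Char) (t : ℕ) (h : t ≤ cs.length) :
    pvP (cs ++ [c]) t = pvP cs t := by
  simp [pvP, List.take_append_of_le_length h]

theorem pvP_append_last (cs : List Char) (c : Char) :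
    pvP (cs ++ [c]) (cs.length + 1) = pvP cs cs.length + pvD c := by
  have h1 : (cs ++ [c]).take (cs.length + 1) = cs ++ [c] := by
    apply List.take_of_length_le; simp
  have h2 : cs.take cs.length = cs := List.take_length ..
  simp [pvP, h1, h2, pvPref_append]

theorem pvFF_le (cs : List Char) (j : ℕ) : pvFF cs j ≤ j := Nat.find_min' _ rfl

theorem pvP_pvFF (cs : List Char) (j : ℕ) : pvP cs (pvFF cs j) = pvP cs j := Nat.find_spec (pvFFex cs j)

theorem pvFF_min (cs : List Char) (j t : ℕ) (h : pvP cs t = pvP cs j) : pvFF cs j ≤ t :=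
  Nat.find_min' _ h

theorem pvFF_stable (cs : List Char) (c : Char) (j : ℕ) (hj : j ≤ cs.length) :
    pvFF (cs ++ [c]) j = pvFF cs j := by
  apply le_antisymm
  · apply pvFF_min
    rw [pvP_append_le _ _ _ (le_trans (pvFF_le cs j) hj), pvP_append_le _ _ _ hj]
    exact pvP_pvFF cs j
  · apply pvFF_min
    have h1 := pvP_pvFF (cs ++ [c]) j
    have h2 : pvFF (cs ++ [c]) j ≤ j := pvFF_le _ j
    rw [pvP_append_le _ _ _ (le_trans h2 hj), pvP_append_le _ _ _ hj] at h1
    exact h1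

theorem pvFF_last_old (cs : List Char) (c : Char) (j : ℕ) (hj : j ≤ cs.length)
    (h : pvP cs j = pvP (cs ++ [c]) (cs.length + 1)) :
    pvFF (cs ++ [c]) (cs.length + 1) = pvFF cs j := by
  apply le_antisymm
  · apply pvFF_min
    rw [pvP_append_le _ _ _ (le_trans (pvFF_le cs j) hj), ← h]
    exact pvP_pvFF cs j
  · apply pvFF_min
    have h2 : pvFF (cs ++ [c]) (cs.length + 1) ≤ j := by
      apply pvFF_min
      rw [pvP_append_le _ _ _ hj]; exact h
    have h1 := pvP_pvFF (cs ++ [c]) (cs.length + 1)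
    rw [pvP_append_le _ _ _ (le_trans h2 hj)] at h1
    rw [h1, ← h]

theorem pvFF_last_new (cs : List Char) (c : Char)
    (h : ∀ j ≤ cs.length, pvP cs j ≠ pvP (cs ++ [c]) (cs.length + 1)) :
    pvFF (cs ++ [c]) (cs.length + 1) = cs.length + 1 := by
  apply le_antisymm (pvFF_le _ _)
  by_contra hlt
  push Not at hlt
  have h2 : pvFF (cs ++ [c]) (cs.length + 1) ≤ cs.length := by omega
  have h1 := pvP_pvFF (cs ++ [c]) (cs.length + 1)
  rw [pvP_append_le _ _ _ h2] at h1
  exact h (pvFF (cs ++ [c]) (cs.length + 1)) h2 h1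

theorem pvM_append (cs : List Char) (c : Char) :
    pvM (cs ++ [c]) = max (pvM cs) ((cs.length + 1 : Int) - pvFF (cs ++ [c]) (cs.length + 1)) := by
  have hlen : (cs ++ [c]).length = cs.length + 1 := by simp
  have hmap : (List.range (cs.length + 1)).map (fun j : Nat => (j : Int) - (pvFF (cs ++ [c]) j : Int))
      = (List.range (cs.length + 1)).map (fun j : Nat => (j : Int) - (pvFF cs j : Int)) := by
    apply List.map_congr_left
    intro j hj
    rw [pvFF_stable cs c j (by simpa using Nat.lt_succ_iff.1 (List.mem_range.1 hj))]
  rw [pvM, hlen, List.range_succ, List.map_append, List.foldl_append, hmap]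
  simp [pvM]

-- ===== A-side characterization =====

def pvAFold (cs : List Char) : PySem.Dict (Int × Int) Int × Int × Int × Int × Int :=
  (PySem.List.enumerate cs 0).foldl pvAStep
    (PySem.Dict.empty.insert ((0 : Int), (0 : Int)) (-1 : Int), 0, 0, 0, 0)

def pvAInv (cs : List Char) : Prop :=
  (pvAFold cs).2.2.2.2 = pvM cs ∧
  ((pvAFold cs).2.2.1 - (pvAFold cs).2.1, (pvAFold cs).2.2.2.1 - (pvAFold cs).2.1) = pvP cs cs.length ∧
  (∀ j ≤ cs.length, (pvAFold cs).1.get? (pvP cs j) = some ((pvFF cs j : Int) - 1)) ∧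
  (∀ v : Int × Int, (pvAFold cs).1.contains v = true → ∃ j ≤ cs.length, pvP cs j = v)

theorem pvAFold_append (cs : List Char) (c : Char) :
    pvAFold (cs ++ [c]) = pvAStep (pvAFold cs) ((cs.length : Int), c) := by
  rw [pvAFold, PySem.List.enumerate_append, List.foldl_append]
  simp [PySem.List.enumerate_cons, PySem.List.enumerate_nil, pvAFold]

theorem pvM_nil : pvM [] = 0 := by
  have : pvFF [] 0 = 0 := Nat.le_zero.1 (pvFF_le [] 0)
  simp [pvM, List.range_succ, this]

theorem pvAInv_nil : pvAInv [] := by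
  refine ⟨by simp [pvAFold, PySem.List.enumerate_nil, pvM_nil], by simp [pvAFold, PySem.List.enumerate_nil, pvP, pvPref], ?_, ?_⟩
  · intro j hj
    have hj0 : j = 0 := by simpa using hj
    subst hj0
    have h0 : pvFF [] 0 = 0 := Nat.le_zero.1 (pvFF_le [] 0)
    have hP : pvP ([] : List Char) 0 = ((0 : Int), (0 : Int)) := by simp [pvP, pvPref]; rfl
    simp [pvAFold, PySem.List.enumerate_nil, h0, hP, PySem.Dict.get?_insert_self]
  · intro v hv
    simp only [pvAFold, PySem.List.enumerate_nil, List.foldl_nil] at hv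
    refine ⟨0, by simp, ?_⟩
    rw [PySem.Dict.contains_eq_isSome_get?] at hv
    rcases Option.isSome_iff_exists.1 hv with ⟨w, hw⟩
    rw [PySem.Dict.get?_insert] at hw
    by_cases h : v = ((0 : Int), (0 : Int))
    · rw [h]; simp [pvP, pvPref]; rfl
    · simp [h, PySem.Dict.get?_empty] at hw

theorem pvState_update (cs : List Char) (c : Char) (ca cb cc : Int)
    (h : (cb - ca, cc - ca) = pvP cs cs.length) (x : Int × Int × Int)
    (hx : x = if c = 'a' then (ca + 1, cb, cc) else if c = 'b' then (ca, cb + 1, cc) else (ca, cb, cc + 1)) :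
    ((x.2.1 - x.1, x.2.2 - x.1) : Int × Int) = pvP (cs ++ [c]) (cs.length + 1) := by
  subst hx
  rw [pvP_append_last, ← h, pvD]
  by_cases h1 : c = 'a'
  · subst h1
    simp [Prod.ext_iff]
    omega
  · by_cases h2 : c = 'b'
    · subst h2
      simp [Prod.ext_iff]
      omega
    · simp [h1, h2, Prod.ext_iff]
      omega

theorem pvAInv_append (cs : List Char) (c : Char) (ih : pvAInv cs) : pvAInv (cs ++ [c]) := by
  obtain ⟨hml, hcnt, hget, hcont⟩ := ih
  rcases hAcs : pvAFold cs with ⟨d, ca, cb, cc, ml⟩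
  rw [hAcs] at hml hcnt hget hcont
  dsimp only at hml hcnt hget hcont
  have hlen : (cs ++ [c]).length = cs.length + 1 := by simp
  have hAF : pvAFold (cs ++ [c]) = pvAStep (d, ca, cb, cc, ml) ((cs.length : Int), c) := by
    rw [pvAFold_append, hAcs]
  unfold pvAStep at hAF
  dsimp only at hAF
  set x : Int × Int × Int :=
    (if c = 'a' then (ca + 1, cb, cc) else if c = 'b' then (ca, cb + 1, cc) else (ca, cb, cc + 1))
    with hx
  have hst : ((x.2.1 - x.1, x.2.2 - x.1) : Int × Int) = pvP (cs ++ [c]) (cs.length + 1) :=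
    pvState_update cs c ca cb cc hcnt x hx
  by_cases hct : d.contains (x.2.1 - x.1, x.2.2 - x.1) = true
  · -- state already seen
    rw [if_pos hct] at hAF
    obtain ⟨j, hj, hPj⟩ := hcont _ hct
    have hget?X : d.get? (x.2.1 - x.1, x.2.2 - x.1) = some ((pvFF cs j : Int) - 1) := by
      rw [← hPj]; exact hget j hj
    have hgd : d.getD (x.2.1 - x.1, x.2.2 - x.1) 0 = (pvFF cs j : Int) - 1 :=
      PySem.Dict.getD_of_get?_eq_some _ _ hget?X
    have hffl : pvFF (cs ++ [c]) (cs.length + 1) = pvFF cs j :=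
      pvFF_last_old cs c j hj (hPj.trans hst)
    refine ⟨?_, ?_, ?_, ?_⟩
    · rw [hAF]
      dsimp only
      rw [hgd, pvM_append, hffl, ← hml]
      congr 1
      push_cast
      ring
    · rw [hAF]
      dsimp only
      rw [hst, hlen]
    · intro j' hj'
      rw [hlen] at hj'
      rw [hAF]
      dsimp only
      by_cases h' : j' ≤ cs.length
      · rw [pvP_append_le _ _ _ h', pvFF_stable cs c j' h']
        exact hget j' h'
      · have h'' : j' = cs.length + 1 := by omega
        subst h''
        rw [← hst, hffl]
        exact hget?X
    · intro v hv
      rw [hAF] at hv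
      dsimp only at hv
      obtain ⟨j', hj', hPj'⟩ := hcont v hv
      exact ⟨j', by rw [hlen]; omega, by rw [pvP_append_le _ _ _ hj']; exact hPj'⟩
  · -- new state
    rw [if_neg hct] at hAF
    have hnew : ∀ j ≤ cs.length, pvP cs j ≠ pvP (cs ++ [c]) (cs.length + 1) := by
      intro j hj hcontra
      apply hct
      rw [PySem.Dict.contains_eq_isSome_get?, hst, ← hcontra, hget j hj]
      rfl
    have hffn : pvFF (cs ++ [c]) (cs.length + 1) = cs.length + 1 := pvFF_last_new cs c hnew
    refine ⟨?_, ?_, ?_, ?_⟩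
    · rw [hAF]
      dsimp only
      rw [pvM_append, hffn, ← hml]
      have h0 : ((cs.length : Int) + 1 - (((cs.length + 1 : ℕ) : Int))) = 0 := by push_cast; ring
      rw [h0, hml]
      exact (max_eq_left (pvM_nonneg cs)).symm
    · rw [hAF]
      dsimp only
      rw [hst, hlen]
    · intro j' hj'
      rw [hlen] at hj'
      rw [hAF]
      dsimp only
      by_cases h' : j' ≤ cs.length
      · rw [pvP_append_le _ _ _ h', pvFF_stable cs c j' h']
        have hne : pvP cs j' ≠ (x.2.1 - x.1, x.2.2 - x.1) := by
          intro hc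
          exact hnew j' h' (hc.trans hst)
        rw [PySem.Dict.get?_insert_of_ne d ((cs.length : Int)) hne]
        exact hget j' h'
      · have h'' : j' = cs.length + 1 := by omega
        subst h''
        rw [← hst, PySem.Dict.get?_insert_self, hffn]
        congr 1
        push_cast
        ring
    · intro v hv
      rw [hAF] at hv
      dsimp only at hv
      rw [PySem.Dict.contains_insert] at hv
      rcases Bool.or_eq_true_iff.1 hv with h' | h'
      · have hvX : v = (x.2.1 - x.1, x.2.2 - x.1) := beq_iff_eq.1 h'
        exact ⟨cs.length + 1, by rw [hlen], by rw [hvX, ← hst]⟩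
      · obtain ⟨j', hj', hPj'⟩ := hcont v h'
        exact ⟨j', by rw [hlen]; omega, by rw [pvP_append_le _ _ _ hj']; exact hPj'⟩

theorem pvAInv_all (cs : List Char) : pvAInv cs := by
  induction cs using List.reverseRecOn with
  | nil => exact pvAInv_nil
  | append_singleton cs c ih => exact pvAInv_append cs c ih

-- ===== B-side characterization =====

theorem pv_pair_add (p : Int × Int) (a b : Int) : p + (a, b) = p ↔ (a = 0 ∧ b = 0) := by
  rcases p with ⟨u, v⟩
  rw [Prod.mk_add_mk, Prod.mk.injEq]
  omega

theorem pvPref_counts (v : List Char) :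
    pvPref v = ((v.countP (fun c => c == 'b') : Int) - (v.countP (fun c => c == 'a') : Int),
                (v.countP (fun c => !(c == 'a') && !(c == 'b')) : Int) - (v.countP (fun c => c == 'a') : Int)) := by
  induction v with
  | nil => simp [pvPref]; rfl
  | cons a t ih =>
    have h : pvPref (a :: t) = pvD a + pvPref t := by simp [pvPref]
    rw [h, ih, pvD]
    by_cases h1 : a = 'a'
    · simp only [h1, if_true, List.countP_cons, Prod.mk_add_mk, Prod.mk.injEq]
      simp
      omega
    · by_cases h2 : a = 'b'
      · simp only [h1, h2, if_false, if_true, List.countP_cons, Prod.mk_add_mk, Prod.mk.injEq]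
        simp [h1]
        omega
      · simp only [h1, h2, if_false, List.countP_cons, Prod.mk_add_mk, Prod.mk.injEq]
        simp [h1, h2]
        omega

theorem pvP_split (cs : List Char) (i k : ℕ) (hik : i ≤ k) :
    pvP cs k = pvP cs i + pvPref ((cs.drop i).take (k - i)) := by
  have h2 : i + (k - i) = k := by omega
  have h : cs.take k = cs.take i ++ (cs.drop i).take (k - i) := by
    rw [← h2, List.take_add, Nat.add_sub_cancel_left]
  rw [pvP, h, pvPref, List.map_append, List.sum_append]
  rfl

theorem pvBal (cs : List Char) (i k : ℕ) (hik : i ≤ k) :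
    ((((cs.drop i).take (k - i)).countP (fun c => c == 'a') : Int) =
        (((cs.drop i).take (k - i)).countP (fun c => c == 'b') : Int) ∧
     ((((cs.drop i).take (k - i)).countP (fun c => c == 'a')) : Int) =
        (((cs.drop i).take (k - i)).countP (fun c => !(c == 'a') && !(c == 'b')) : Int))
    ↔ pvP cs k = pvP cs i := by
  rw [pvP_split cs i k hik, pvPref_counts, pv_pair_add]
  omega

theorem pvB_inner (cs : List Char) (i : ℕ) (m : ℕ) (him : i ≤ m) (hm : m ≤ cs.length)
    (ml : Int) (h0 : 0 ≤ ml) :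
    (PySem.List.pyRange (i : Int) ((m : ℕ) : Int) 1).foldl
      (fun st j =>
        let ch := PySem.List.pyGetD cs j ' '
        let cnts : Int × Int × Int :=
          if ch = 'a' then (st.1 + 1, st.2.1, st.2.2.1)
          else if ch = 'b' then (st.1, st.2.1 + 1, st.2.2.1)
          else (st.1, st.2.1, st.2.2.1 + 1)
        (cnts.1, cnts.2.1, cnts.2.2,
          if cnts.1 = cnts.2.1 ∧ cnts.1 = cnts.2.2 then max st.2.2.2 (j - (i : Int) + 1)
          else st.2.2.2))
      ((0 : Int), (0 : Int), (0 : Int), ml)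
    = ((((cs.drop i).take (m - i)).countP (fun c => c == 'a') : Int),
       (((cs.drop i).take (m - i)).countP (fun c => c == 'b') : Int),
       (((cs.drop i).take (m - i)).countP (fun c => !(c == 'a') && !(c == 'b')) : Int),
       ((List.range (m - i)).map (pvTerm cs i)).foldl max ml) := by
  revert hm
  induction m, him using Nat.le_induction with
  | base =>
    intro hm
    rw [PySem.List.pyRange_one_eq_nil le_rfl]
    simp
  | succ m him ih =>
    intro hm
    have hmlt : m < cs.length := by omega
    have hcast : ((m + 1 : ℕ) : Int) = (m : Int) + 1 := by push_cast; ring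
    rw [hcast, PySem.List.pyRange_one_succ_right (by exact_mod_cast him), List.foldl_append,
      ih (by omega)]
    have hw' : (cs.drop i).take (m + 1 - i) = (cs.drop i).take (m - i) ++ [cs[m]] := by
      have h1 : m + 1 - i = (m - i) + 1 := by omega
      rw [h1, List.take_succ]
      have h2 : (cs.drop i)[m - i]? = some cs[m] := by
        rw [List.getElem?_drop]
        have h3 : i + (m - i) = m := by omega
        rw [h3]
        exact List.getElem?_eq_getElem hmlt
      rw [h2]
      rfl
    have hrange : List.range (m + 1 - i) = List.range (m - i) ++ [m - i] := by
      have h1 : m + 1 - i = (m - i) + 1 := by omega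
      rw [h1, List.range_succ]
    have hterm : pvTerm cs i (m - i) = if pvP cs (m + 1) = pvP cs i then ((m - i : ℕ) : Int) + 1 else 0 := by
      rw [pvTerm]
      have h1 : i + (m - i) + 1 = m + 1 := by omega
      rw [h1]
    have hch : PySem.List.pyGetD cs ((m : ℕ) : Int) ' ' = cs[m] := PySem.List.pyGetD_ofNat cs m ' ' hmlt
    set w := (cs.drop i).take (m - i) with hwdef
    set prev := ((List.range (m - i)).map (pvTerm cs i)).foldl max ml with hprev
    have hprev0 : 0 ≤ prev := le_trans h0 (pv_le_foldl_max_init _ _)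
    have hbal := pvBal cs i (m + 1) (by omega)
    rw [hw'] at hbal
    simp only [List.foldl_cons, List.foldl_nil, hch, hrange, hw', List.map_append,
      List.foldl_append, List.countP_append, hterm]
    simp only [List.countP_cons, List.countP_nil, List.foldl_cons, List.foldl_nil]
    by_cases ha : cs[m] = 'a'
    · simp only [ha, if_true]
      simp only [ha] at hbal
      simp [List.countP_append, List.countP_cons] at hbal
      push_cast at hbal
      simp only [List.map_cons, List.map_nil, List.foldl_cons, List.foldl_nil, hterm, ← hprev]
      rw [if_congr hbal rfl rfl]
      simp only [Prod.mk.injEq]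
      refine ⟨by simp, by simp, by simp, ?_⟩
      split_ifs with hc
      · congr 1
        omega
      · exact (max_eq_left hprev0).symm
    · by_cases hb : cs[m] = 'b'
      · rw [if_neg ha, if_pos hb]
        simp only [hb] at hbal
        simp [List.countP_append, List.countP_cons, ha] at hbal
        push_cast at hbal
        have hco : ((List.countP (fun c => c == 'a') w : Int) = (List.countP (fun c => c == 'b') w : Int) + 1 ∧
            (List.countP (fun c => c == 'a') w : Int) = (List.countP (fun c => !c == 'a' && !c == 'b') w : Int))
            ↔ pvP cs (m + 1) = pvP cs i := by
          rw [← hbal]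
          omega
        simp only [List.map_cons, List.map_nil, List.foldl_cons, List.foldl_nil, hterm, ← hprev]
        rw [if_congr hco rfl rfl]
        simp only [Prod.mk.injEq]
        refine ⟨by simp [hb], by simp [hb], by simp [hb], ?_⟩
        split_ifs with hc
        · congr 1
          omega
        · exact (max_eq_left hprev0).symm
      · rw [if_neg ha, if_neg hb]
        simp [List.countP_append, List.countP_cons, ha, hb] at hbal
        push_cast at hbal
        have hco : ((List.countP (fun c => c == 'a') w : Int) = (List.countP (fun c => c == 'b') w : Int) ∧
            (List.countP (fun c => c == 'a') w : Int) = (List.countP (fun c => !c == 'a' && !c == 'b') w : Int) + 1)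
            ↔ pvP cs (m + 1) = pvP cs i := by
          rw [← hbal]
          omega
        simp only [List.map_cons, List.map_nil, List.foldl_cons, List.foldl_nil, hterm, ← hprev]
        rw [if_congr hco rfl rfl]
        simp only [Prod.mk.injEq]
        refine ⟨by simp [ha], by simp [hb], by simp [ha, hb], ?_⟩
        split_ifs with hc
        · congr 1
          omega
        · exact (max_eq_left hprev0).symm

theorem pvB_outer (cs : List Char) (l : List ℕ) (h : ∀ k ∈ l, k ≤ cs.length) (ml : Int)
    (h0 : 0 ≤ ml) :
    l.foldl (fun acc k =>
      ((PySem.List.pyRange ((k : ℕ) : Int) ((cs.length : Int)) 1).foldl (fun st j =>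
        let ch := PySem.List.pyGetD cs j ' '
        let cnts : Int × Int × Int :=
          if ch = 'a' then (st.1 + 1, st.2.1, st.2.2.1)
          else if ch = 'b' then (st.1, st.2.1 + 1, st.2.2.1)
          else (st.1, st.2.1, st.2.2.1 + 1)
        (cnts.1, cnts.2.1, cnts.2.2,
          if cnts.1 = cnts.2.1 ∧ cnts.1 = cnts.2.2 then max st.2.2.2 (j - ((k : ℕ) : Int) + 1)
          else st.2.2.2))
      ((0 : Int), (0 : Int), (0 : Int), acc)).2.2.2) ml
    = (l.map (pvG cs)).foldl max ml := by
  induction l generalizing ml with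
  | nil => rfl
  | cons k t iht =>
    simp only [List.foldl_cons, List.map_cons]
    have hk := h k (List.mem_cons_self)
    rw [pvB_inner cs k cs.length hk le_rfl ml h0]
    have habs : ((List.range (cs.length - k)).map (pvTerm cs k)).foldl max ml
        = max ml (pvG cs k) := pv_foldl_max_absorb _ _ _ h0
    rw [habs, iht (fun k' hk' => h k' (List.mem_cons_of_mem _ hk')) _
      (le_trans h0 (le_max_left _ _))]

theorem pvB_eq (s : String) : longest_three_balanced_py_alt s = pvBval s.toList := by
  unfold longest_three_balanced_py_alt
  dsimp only
  rw [PySem.List.pyRange_zero_natCast, List.foldl_map]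
  exact pvB_outer s.toList (List.range s.toList.length)
    (fun k hk => le_of_lt (List.mem_range.1 hk)) 0 le_rfl

theorem pvM_eq_pvBval (cs : List Char) : pvM cs = pvBval cs := by
  apply le_antisymm
  · apply pv_foldl_max_le _ _ _ (pvBval_nonneg cs)
    intro x hx
    rw [List.mem_map] at hx
    obtain ⟨j, hj, rfl⟩ := hx
    rw [List.mem_range] at hj
    by_cases hf : pvFF cs j = j
    · rw [hf, sub_self]
      exact pvBval_nonneg cs
    · have hlt : pvFF cs j < j := lt_of_le_of_ne (pvFF_le cs j) hf
      have h1 : ((j : Int) - pvFF cs j) ≤ pvG cs (pvFF cs j) := by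
        apply pv_le_foldl_max_of_mem
        rw [List.mem_map]
        refine ⟨j - pvFF cs j - 1, List.mem_range.2 (by omega), ?_⟩
        rw [pvTerm]
        have he : pvFF cs j + (j - pvFF cs j - 1) + 1 = j := by omega
        rw [he, if_pos (pvP_pvFF cs j).symm]
        omega
      refine le_trans h1 (pv_le_foldl_max_of_mem _ _ _ ?_)
      rw [List.mem_map]
      exact ⟨pvFF cs j, List.mem_range.2 (by omega), rfl⟩
  · apply pv_foldl_max_le _ _ _ (pvM_nonneg cs)
    intro x hx
    rw [List.mem_map] at hx
    obtain ⟨i, hi, rfl⟩ := hx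
    rw [List.mem_range] at hi
    apply pv_foldl_max_le _ _ _ (pvM_nonneg cs)
    intro y hy
    rw [List.mem_map] at hy
    obtain ⟨t, ht, rfl⟩ := hy
    rw [List.mem_range] at ht
    rw [pvTerm]
    split_ifs with hc
    · have hffk : pvFF cs (i + t + 1) ≤ i := pvFF_min cs (i + t + 1) i hc.symm
      have h2 : ((t : Int) + 1) ≤ ((i + t + 1 : ℕ) : Int) - pvFF cs (i + t + 1) := by omega
      refine le_trans h2 (pv_le_foldl_max_of_mem _ _ _ ?_)
      rw [List.mem_map]
      exact ⟨i + t + 1, List.mem_range.2 (by omega), rfl⟩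
    · exact pvM_nonneg cs

-- ===== VERDICT (by name: the statement is the Claim_ definition above) =====
theorem longest_three_balanced_py_spec : Claim_equal_longest_three_balanced_py := by
  intro s _
  unfold Spec_longest_three_balanced_py
  have hA : longest_three_balanced_py s = pvM s.toList := (pvAInv_all s.toList).1
  rw [hA, pvB_eq, pvM_eq_pvBval]
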